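/-
  THE SPLIT OF SEGMENT .1 OF `vorbis_decode_packet_rest` (0x110b00–0x110c3f; claim `Seg1` of Vorbis/Spec/PacketRest.lean) AT 0x110bda
  (`mov rdi, rdx`, stb_vorbis_fixed.c line 3217: the first instruction after the last poison store of the prologue;
  label `Vorbis.L.vorbis_decode_packet_rest.at_110bda`).

      At1b                   the assertion at 0x110bda: the six pushes, `sub rsp, 0xb88`, the five spills, the three words of the frame
                             header and the twelve poison stores are done; the shadow layer holds with the function's own frame in
                             front; so far only the stack area and its shadow have been written
      Seg1a                  unit `vorbis_decode_packet_rest.1a`, 0x110b00–0x110bd0 (32 instructions, NO call): the function's entry → `At1b`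
      Seg1b                  unit `vorbis_decode_packet_rest.1b`, 0x110bda–0x110c3f (23 instructions, four check calls): `At1b` → `At2 … 0`
      Seg1.of_parts          `Seg1a → Seg1b → Seg1` (PROVED here: `ReachVia.trans`)
      shadowAddr_ownFrame, readLE_below_ownShadow
                             the two general lemmas of the prologue: the shadow address of a granule of the function's own frame in the
                             walker's form, and "the poison stores do not change a read below the shadow region"

  WHY THE CUT IS THERE. Before 0x110bda the shadow is written (the twelve poison stores), after it never: `v_untouched` relative to
  the entry memory is false for every state after 0x110b62, relative to the memory at 0x110bda it holds for the rest of the segment.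
  So the state at 0x110bda is a base state like a loop head: `At1b.shadow` is the `ShadowInv` of ITS memory, and the four check sites
  of the second half (`LiveIn.accSmall At1b.shadow (by v_untouched)`) go through unchanged.

  WHAT `At1b` DOES NOT CARRY, because the second half derives it from `At1b.pre` and `At1b.same` (see farm/hints/vorbis_decode_packet_rest.1.md):
  the decode-time invariant of the current memory (`Frame.inv`: `DecodeInv.carry`), the two stack arguments and `mem32[p_left]`
  (`Stable.arg_re`, `.arg_left`, `.left_val`: they lie above the entry rsp and below the shadow, outside both spans of `At1b.same`).
-/
import Vorbis.Spec.PacketRest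
import Vorbis.Spec.PacketRestFrame
import Vorbis.LabelsAt
namespace Vorbis.Spec.vorbis_decode_packet_rest
open X86 X86.User Asan Vorbis Vorbis.Spec

/-! ### Two general lemmas of the protected prologue -/

/-- The shadow address of granule `k` of the protected frame at `w − 2872` (`w` the function's entry stack pointer), in the form the
walker leaves for `mov DWORD PTR [rax + 0xc00000 + k], …` with `rax = (rsp + 0x80) >> 3`: the rewrite that turns the walker's twelve
`writeLE` layers into `storesMem … Vorbis.Frames.vorbis_decode_packet_rest.prologue` (what `ShadowInv.prologue_ra` speaks about). -/
theorem shadowAddr_ownFrame (w c : Word) (k : Nat) (hc : c.toNat = 0xC00000 + k)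
    (hw : 0x700000 + 3856 ≤ w.toNat) (hw2 : w.toNat + 8 ≤ 0x800000) :
    shadowAddr ((w.toNat - 2872) / 8 + k) = (w - 2872) >>> 3 + c := by
  apply UInt64.toNat_inj.mp
  unfold shadowAddr
  rw [UInt64.toNat_ofNat']
  u_omega

/-- A read below the shadow region (`a + k ≤ C00000H`) is not changed by the poison stores of the frame at `w − 2872`: they write the
352 shadow bytes of that frame and nothing else (`Asan.storesMem_sameExcept`). The way around `u_read` / `u_resolve`, which cannot cross
the poison stores (their addresses are `(w − 2872) >>> 3 + c`). -/
theorem readLE_below_ownShadow (w : Word) (M0 M1 : Mem)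
    (hs : Mem.SameExcept [⟨0xC00000 + (w.toNat - 2872) / 8, 0xC00000 + (w.toNat - 2872) / 8 + 352⟩] M0 M1)
    (a : Word) (k : Nat) (ha : a.toNat + k ≤ 0xC00000) : M1.readLE a k = M0.readLE a k := by
  apply hs.readLE a k (by omega)
  intro w' hw'
  have e := List.mem_singleton.mp hw'
  subst e
  left
  simp only []
  omega

/-! ### The assertion at the new cut point -/

/-- **The assertion at 0x110bda** (`Vorbis.L.vorbis_decode_packet_rest.at_110bda`: `mov rdi, rdx`, line 3217), about the state `v`
relative to the function's entry state `u`: the six pushes, `sub rsp, 0xb88`, the five spills, the frame header and the twelve poison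
stores are done. The shadow layer holds with the function's own protected frame in front (`ShadowInv.prologue_ra`); from here on no
store of the segment goes to the shadow.

Live registers at 0x110bda (read before written by 0x110bda–0x110c3f): `rsp`, `rdx` (copied to `rdi` for the first check call), `r14`
(`m`: the two byte loads), `r15` (`f`: the two loads from `*f`), `r13` (`SB`, spilled to `[rsp + 0x60]` at 0x110c37). `rax`, `rbx`, `rbp`,
`rdi`, `rcx` are written before they are read. The slots are spelled as the walker leaves them, relative to the ENTRY rsp
(`u.reg .rsp − 2936` is `[steady rsp + 0x40]`: `3000 − 0x40 = 2936`). -/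
structure At1b (u₀ : State) (others : List Obj) (frames : List (Nat × FrameLayout)) (len : Nat) (Ar : Arena)
    (stored room : Int) (mode : Nat) (ysz : Nat → Nat) (u : State) (ret : Word) (v : State) : Prop where
  /-- the function was entered at `u` by a call that returns to `ret` (alignment, stack room, `ret < 40000000H`) -/
  entry : AtEntry (Vorbis.conv u₀) Vorbis.L.vorbis_decode_packet_rest.entry 3856 ret u
  /-- its precondition held there: the source of `DecodeInv`, of `Args` (the mode, W2, `mem32[p_left] = left_start`, `len` / `p_left`
  stack objects of the callers) and of the shadow layer of the callers' frames -/
  pre : (vorbis_decode_packet_rest.spec others frames len Ar stored room mode ysz).pre u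
  /-- at 0x110bda, after the last poison store (0x110bd0) and before the first check call (0x110bdd) -/
  rip : v.rip = Vorbis.L.vorbis_decode_packet_rest.at_110bda
  /-- the steady stack pointer: six pushes and `sub rsp, 0xb88` (`48 + 2952 = 3000`) -/
  rsp : v.reg .rsp = u.reg .rsp - 3000
  /-- `r13 = SB = (steady rsp + 0x80) >> 3` (0x110b2f `lea`, 0x110b5b `shr`, 0x110b5f `mov r13, rax`): the shadow offset of the frame -/
  r13 : v.reg .r13 = (u.reg .rsp - 2872) >>> 3
  /-- `r14 = m` (0x110b1e) -/
  r14 : v.reg .r14 = u.reg .rdx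
  /-- `r15 = f` (0x110b11) -/
  r15 : v.reg .r15 = u.reg .rdi
  /-- `rdx = m` still: no instruction of the prologue writes rdx -/
  rdx : v.reg .rdx = u.reg .rdx
  /-- the text is unchanged (`Vorbis.CodeOK u₀ v.mem`, spelled as the walker's `w_eq`) -/
  code : Mem.EqOn Vorbis.L.textLo Vorbis.L.textHi u₀.mem v.mem
  /-- DF = 0 (the prologue has no `std`) -/
  df : v.flags .df = false
  /-- the MXCSR exception masks are set (the prologue does not touch MXCSR) -/
  mx : v.mxcsr &&& 0x1F80 = 0x1F80
  /-- so far only the function's stack area `[rsp − 3856, rsp)` and the shadow of that area (`shadowSpan`, spelled out) have been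
  written: the two stack arguments, `*f`, every allocated block and the callers' objects read as at the entry -/
  same : Mem.SameExcept [⟨(u.reg .rsp).toNat - 3856, (u.reg .rsp).toNat⟩,
    ⟨0xC00000 + ((u.reg .rsp).toNat - 3856) / 8, 0xC00000 + ((u.reg .rsp).toNat + 7) / 8⟩] u.mem v.mem
  /-- the shadow layer with the function's own protected frame poisoned, the clean stack ending at the steady rsp (`Frame.shadow`) -/
  shadow : ShadowInv others (framesIn frames u) (spOf u).toNat v.mem
  /-- the return address is still in its slot -/
  ra : UInt64.ofNat (v.mem.readLE (u.reg .rsp) 8) = ret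
  /-- saved r15 (0x110b00) -/
  s_r15 : UInt64.ofNat (v.mem.readLE (u.reg .rsp - 8) 8) = u.reg .r15
  /-- saved r14 (0x110b02) -/
  s_r14 : UInt64.ofNat (v.mem.readLE (u.reg .rsp - 16) 8) = u.reg .r14
  /-- saved r13 (0x110b04) -/
  s_r13 : UInt64.ofNat (v.mem.readLE (u.reg .rsp - 24) 8) = u.reg .r13
  /-- saved r12 (0x110b06) -/
  s_r12 : UInt64.ofNat (v.mem.readLE (u.reg .rsp - 32) 8) = u.reg .r12
  /-- saved rbp (0x110b08) -/
  s_rbp : UInt64.ofNat (v.mem.readLE (u.reg .rsp - 40) 8) = u.reg .rbp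
  /-- saved rbx (0x110b09) -/
  s_rbx : UInt64.ofNat (v.mem.readLE (u.reg .rsp - 48) 8) = u.reg .rbx
  /-- `[rsp + 0x40] = f` (0x110b14) -/
  slot_f : v.mem.readLE (u.reg .rsp - 2936) 8 = (u.reg .rdi).toNat
  /-- `[rsp + 0x68] = len` (0x110b19) -/
  slot_len : v.mem.readLE (u.reg .rsp - 2896) 8 = (u.reg .rsi).toNat
  /-- `[rsp + 0x70] = m` (0x110b21) -/
  slot_m : v.mem.readLE (u.reg .rsp - 2888) 8 = (u.reg .rdx).toNat
  /-- `[rsp + 0x78] = left_start`, the low half of rcx (0x110b26) -/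
  slot_ls : v.mem.readLE (u.reg .rsp - 2880) 4 = (Word.part .w32 (u.reg .rcx)).toNat
  /-- `[rsp + 0x7c] = right_start`, the low half of r9 (0x110b2a) -/
  slot_rs : v.mem.readLE (u.reg .rsp - 2876) 4 = (Word.part .w32 (u.reg .r9)).toNat

/-! ### The two child claims and their composition -/

/-- **Segment .1a, 0x110b00–0x110bd0** (line 3208; unit `vorbis_decode_packet_rest.1a`): the prologue — six pushes, `sub rsp, 0xb88`,
the five spills, the three words of the frame header, `SB`, the twelve poison stores (`ShadowInv.prologue_ra` with
`Vorbis.Frames.vorbis_decode_packet_rest`) → 0x110bda. No call. Its entry assertion is the function's, as `Seg1`'s. -/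
def Seg1a (Lay : Layout) (μ : Microarch) (u₀ : State) : Prop :=
  ∀ (others : List Obj) (frames : List (Nat × FrameLayout)) (len : Nat) (Ar : Arena) (stored room : Int)
      (mode : Nat) (ysz : Nat → Nat) (u : State) (ret : Word),
    AtEntry (Vorbis.conv u₀) Vorbis.L.vorbis_decode_packet_rest.entry 3856 ret u →
    (vorbis_decode_packet_rest.spec others frames len Ar stored room mode ysz).pre u →
    ReachVia Lay μ Vorbis.WayInv u (fun w => At1b u₀ others frames len Ar stored room mode ysz u ret w)

/-- **Segment .1b, 0x110bda–0x110c3f** (lines 3217–3225; unit `vorbis_decode_packet_rest.1b`): `n = f->blocksize[m->blockflag]`,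
`map = &f->mapping[m->mapping]`, `n2 = n >> 1`, `i = 0`, the spill of `SB` → .2 (0x1112d4) with `i = 0`. Four check sites, all inside `*f`. -/
def Seg1b (Lay : Layout) (μ : Microarch) (u₀ : State) : Prop :=
  ∀ (others : List Obj) (frames : List (Nat × FrameLayout)) (len : Nat) (Ar : Arena) (stored room : Int)
      (mode : Nat) (ysz : Nat → Nat) (u : State) (ret : Word) (v : State),
    (At1b u₀ others frames len Ar stored room mode ysz u ret v) →
    ReachVia Lay μ Vorbis.WayInv v (fun w => At2 u₀ others frames len Ar stored room mode ysz u ret 0 w)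

/-- **Segment .1 from its two halves**: .1a reaches 0x110bda with `At1b`, .1b goes on from there to the head of the channel loop. -/
theorem Seg1.of_parts {Lay : Layout} {μ : Microarch} {u₀ : State} (ha : Seg1a Lay μ u₀) (hb : Seg1b Lay μ u₀) :
    Seg1 Lay μ u₀ := by
  intro others frames len Ar stored room mode ysz u ret he hpre
  refine (ha others frames len Ar stored room mode ysz u ret he hpre).trans ?_
  intro v hv
  exact hb others frames len Ar stored room mode ysz u ret v hv

end Vorbis.Spec.vorbis_decode_packet_rest
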